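-- pv_equiv track=rewrite | github.com/ilefde/codingJam | foregone.py | detect_digit
-- ===== SOURCE A (Python) =====
-- def detect_digit(N):
--     C=str(N)
--     powers=[]
--     B=0
--
--
--     for i in range(len(C)):
--         if C[i]=='4':
--             powers.append(i)
--
--     for j in range(len(powers)):
--         B=B+2*10**(len(C)-1-powers[j])
--     return(B)
-- ===== SOURCE B (Python) =====
-- def detect_digit(N):
--     # Horner accumulation: one pass over str(N), no positions list, no power arithmetic.
--     b = 0
--     for c in str(N):
--         b = b * 10 + (2 if c == '4' else 0)
--     return b
-- ===== Notes on version B (the rewrite author's own statement) =====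
-- stated objective: idiomatic
-- what changed: B replaces A's two passes (collect the indices of the matching digits, then sum an explicitly computed power of ten for each stored index) by a single Horner-rule pass over str(N) that accumulates b = b*ten + (two if the character is the target digit else zero), eliminating the positions list and the power arithmetic.
import Mathlib
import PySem

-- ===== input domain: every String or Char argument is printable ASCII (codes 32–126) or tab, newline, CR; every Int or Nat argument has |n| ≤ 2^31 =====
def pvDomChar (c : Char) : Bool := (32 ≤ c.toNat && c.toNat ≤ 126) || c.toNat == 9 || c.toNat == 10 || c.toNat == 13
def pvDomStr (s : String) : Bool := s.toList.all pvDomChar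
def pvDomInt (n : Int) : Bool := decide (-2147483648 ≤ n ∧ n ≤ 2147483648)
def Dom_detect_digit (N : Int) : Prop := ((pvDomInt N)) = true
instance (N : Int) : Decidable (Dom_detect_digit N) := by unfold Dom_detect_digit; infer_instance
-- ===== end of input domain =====

-- B replaces A's two passes (collect '4' positions, then sum 2*10^(len-1-i)) by one
-- Horner-rule pass over str(N); same result, no positions list or power arithmetic.

-- ===== PORT A =====
-- str(N) is ported as its character list (exact: PySem.Int.toList_toStr).
-- Python's 10**k here always has k ≥ 0 (each stored index is < len(C)), so '.toNat' is exact.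
def detect_digit (N : Int) : Int :=
  let C : List Char := PySem.Int.toChars N
  let powers : List Int :=
    (PySem.List.pyRange 0 C.length 1).foldl
      (fun ps i => if PySem.List.pyGetD C i ' ' = '4' then ps ++ [i] else ps) []
  (PySem.List.pyRange 0 powers.length 1).foldl
    (fun B j => B + 2 * 10 ^ (((C.length : Int) - 1 - PySem.List.pyGetD powers j 0).toNat)) 0

-- ===== PORT B =====
def detect_digit_alt (N : Int) : Int :=
  (PySem.Int.toChars N).foldl (fun b c => b * 10 + (if c = '4' then 2 else 0)) 0

-- ===== PRECONDITION & SPEC =====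
def Spec_detect_digit (N : Int) (out : Int) : Prop := out = detect_digit_alt N
instance (N : Int) (out : Int) : Decidable (Spec_detect_digit N out) := by unfold Spec_detect_digit; infer_instance

-- ===== CLAIM (what is proved, stated in full; the proofs are below) =====
def Claim_equal_detect_digit : Prop := ∀ (N : Int), Dom_detect_digit N → Spec_detect_digit N (detect_digit N)

-- ===== LEMMAS AND PROOFS =====

/-- Reference value: 2·10^(number of digits to the right) summed over the '4' characters. -/
def pvS : List Char → Int
  | [] => 0
  | c :: cs => (if c = '4' then 2 * 10 ^ cs.length else 0) + pvS cs

theorem pvHorner (C : List Char) (b : Int) :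
    C.foldl (fun b c => b * 10 + (if c = '4' then 2 else 0)) b = b * 10 ^ C.length + pvS C := by
  induction C generalizing b with
  | nil => simp [pvS]
  | cons c cs ih =>
      simp only [List.foldl_cons, pvS, ih, List.length_cons]
      split_ifs <;> ring

theorem pvSumIte (C : List Char) :
    ((List.range C.length).map
       (fun i => if C.getD i ' ' = '4' then 2 * 10 ^ (C.length - 1 - i) else 0)).sum = pvS C := by
  induction C with
  | nil => simp [pvS]
  | cons c cs ih =>
      rw [List.length_cons, List.range_succ_eq_map, pvS, ← ih]
      simp only [List.map_cons, List.map_map, List.sum_cons]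
      congr 1
      apply congrArg List.sum
      apply List.map_congr_left
      intro i hi
      simp only [Function.comp_apply, Nat.succ_eq_add_one, List.getD_cons_succ]
      have he : cs.length + 1 - 1 - (i + 1) = cs.length - 1 - i := by omega
      rw [he]

theorem pvFilterMapSum (l : List Nat) (q : Nat → Bool) (g : Nat → Int) :
    ((l.filter q).map g).sum = (l.map (fun i => if q i then g i else 0)).sum := by
  induction l with
  | nil => simp
  | cons x xs ih =>
      by_cases h : q x = true <;> simp [h, ih]

theorem pvA_core (C : List Char) :
    ((PySem.List.pyRange 0
        ((((PySem.List.pyRange 0 C.length 1).foldl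
            (fun ps i => if PySem.List.pyGetD C i ' ' = '4' then ps ++ [i] else ps)
            ([] : List Int))).length) 1).foldl
      (fun B j => B + 2 * 10 ^ (((C.length : Int) - 1 -
          PySem.List.pyGetD ((PySem.List.pyRange 0 C.length 1).foldl
            (fun ps i => if PySem.List.pyGetD C i ' ' = '4' then ps ++ [i] else ps)
            ([] : List Int)) j 0).toNat)) 0) = pvS C := by
  rw [PySem.List.foldl_append_ite_eq_filter, List.nil_append]
  set P := (PySem.List.pyRange 0 (C.length : Int) 1).filter
      (fun x => decide (PySem.List.pyGetD C x ' ' = '4')) with hP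
  rw [PySem.List.foldl_pyRange_zero_pyGetD' P 0
      (fun B p => B + 2 * 10 ^ (((C.length : Int) - 1 - p).toNat)) 0]
  rw [PySem.List.foldl_add (g := fun p => 2 * 10 ^ (((C.length : Int) - 1 - p).toNat)), zero_add]
  rw [hP, PySem.List.pyRange_zero_nat, List.filter_map, List.map_map]
  rw [pvFilterMapSum]
  rw [← pvSumIte C]
  apply congrArg List.sum
  apply List.map_congr_left
  intro i _
  have he : (((C.length : Int) - 1 - (i : Int)).toNat) = C.length - 1 - i := by omega
  simp [Function.comp, he]

-- ===== VERDICT (by name: the statement is the Claim_ definition above) =====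
theorem detect_digit_spec : Claim_equal_detect_digit := by
  intro N _
  unfold Spec_detect_digit detect_digit detect_digit_alt
  rw [pvHorner, zero_mul, zero_add]
  exact pvA_core (PySem.Int.toChars N)
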